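-- pv_equiv track=rewrite | github.com/kevinnbass/TestMaster | organized_codebase/testing/complexity_analysis.py | _categorize_complexities
-- ===== SOURCE A (Python) =====
-- from typing import Dict, List, Any, Set, Tuple, Optional
--
-- def _categorize_complexities(complexities: List[int]) -> Dict[str, int]:
--     """Categorize complexities into risk levels."""
--     categories = {
--         'simple': 0,        # 1-5
--         'moderate': 0,      # 6-10
--         'high': 0,          # 11-20
--         'very_high': 0,     # 21-50
--         'extremely_high': 0 # >50
--     }
--
--     for complexity in complexities:
--         if complexity <= 5:
--             categories['simple'] += 1
--         elif complexity <= 10: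
--             categories['moderate'] += 1
--         elif complexity <= 20:
--             categories['high'] += 1
--         elif complexity <= 50:
--             categories['very_high'] += 1
--         else:
--             categories['extremely_high'] += 1
--
--     return categories
-- ===== SOURCE B (Python) =====
-- def _categorize_complexities(complexities):
--     """Categorize complexities into risk levels via cumulative counts.
--
--     Counts how many values fall at or below each threshold (staged passes),
--     then the size of each bucket is the difference of adjacent cumulative counts.
--     """
--     n5 = sum(1 for x in complexities if x <= 5)
--     n10 = sum(1 for x in complexities if x <= 10)
--     n20 = sum(1 for x in complexities if x <= 20)
--     n50 = sum(1 for x in complexities if x <= 50)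
--     n = len(complexities)
--     return {
--         'simple': n5,
--         'moderate': n10 - n5,
--         'high': n20 - n10,
--         'very_high': n50 - n20,
--         'extremely_high': n - n50,
--     }
-- ===== Notes on version B (the rewrite author's own statement) =====
-- stated objective: alternative
-- what changed: Replaces the single pass with a per-element five-way branch by staged cumulative counting: four whole-list counts of values at or below each threshold, with bucket sizes obtained as differences of adjacent cumulative counts (no per-element dispatch into a dict).
import Mathlib
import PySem

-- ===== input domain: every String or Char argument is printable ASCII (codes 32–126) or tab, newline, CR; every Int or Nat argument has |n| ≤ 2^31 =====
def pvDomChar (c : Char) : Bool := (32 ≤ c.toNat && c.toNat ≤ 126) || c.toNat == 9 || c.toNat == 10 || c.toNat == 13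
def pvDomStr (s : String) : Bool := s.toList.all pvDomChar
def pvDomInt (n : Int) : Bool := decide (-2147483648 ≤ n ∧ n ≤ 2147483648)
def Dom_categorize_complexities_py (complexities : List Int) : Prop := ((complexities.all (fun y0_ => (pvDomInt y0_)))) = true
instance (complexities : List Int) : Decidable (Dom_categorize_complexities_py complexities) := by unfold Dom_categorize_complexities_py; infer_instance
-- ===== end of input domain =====

-- B replaces A's per-element five-way dispatch by staged cumulative counts at each
-- threshold, differencing adjacent counts to get bucket sizes — objective: alternative.

-- ===== PORT A =====
def categorize_complexities_py (complexities : List Int) : List (String × Int) :=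
  let categories : PySem.Dict String Int := PySem.Dict.ofList
    [("simple", 0), ("moderate", 0), ("high", 0), ("very_high", 0), ("extremely_high", 0)]
  let categories := complexities.foldl (fun d complexity =>
    if complexity ≤ 5 then d.modify "simple" 0 (· + 1)
    else if complexity ≤ 10 then d.modify "moderate" 0 (· + 1)
    else if complexity ≤ 20 then d.modify "high" 0 (· + 1)
    else if complexity ≤ 50 then d.modify "very_high" 0 (· + 1)
    else d.modify "extremely_high" 0 (· + 1)) categories
  categories.items

-- ===== PORT B =====
-- sum(1 for x in xs if x <= t) is the count of elements ≤ t (List.countP, cast to Int)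
def categorize_complexities_py_alt (complexities : List Int) : List (String × Int) :=
  let n5 : Int := complexities.countP (fun x => x ≤ 5)
  let n10 : Int := complexities.countP (fun x => x ≤ 10)
  let n20 : Int := complexities.countP (fun x => x ≤ 20)
  let n50 : Int := complexities.countP (fun x => x ≤ 50)
  let n : Int := complexities.length
  [("simple", n5), ("moderate", n10 - n5), ("high", n20 - n10),
   ("very_high", n50 - n20), ("extremely_high", n - n50)]

-- ===== PRECONDITION & SPEC =====
def Spec_categorize_complexities_py (complexities : List Int) (out : List (String × Int)) : Prop := out = categorize_complexities_py_alt complexities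
instance (complexities : List Int) (out : List (String × Int)) : Decidable (Spec_categorize_complexities_py complexities out) := by unfold Spec_categorize_complexities_py; infer_instance

-- ===== CLAIM =====
def Claim_equal_categorize_complexities_py : Prop := ∀ (complexities : List Int), Dom_categorize_complexities_py complexities → Spec_categorize_complexities_py complexities (categorize_complexities_py complexities)

-- ===== LEMMAS AND PROOFS =====

-- A's loop, started from arbitrary counter values, ends with each counter raised by its bucket's count
lemma fold_items (cs : List Int) (a b c d e : Int) :
    (cs.foldl (fun d complexity =>
      if complexity ≤ 5 then d.modify "simple" 0 (· + 1)
      else if complexity ≤ 10 then d.modify "moderate" 0 (· + 1)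
      else if complexity ≤ 20 then d.modify "high" 0 (· + 1)
      else if complexity ≤ 50 then d.modify "very_high" 0 (· + 1)
      else d.modify "extremely_high" 0 (· + 1))
      (PySem.Dict.ofList
        [("simple", a), ("moderate", b), ("high", c), ("very_high", d), ("extremely_high", e)])).items
    = [("simple", a + cs.countP (fun x => x ≤ 5)),
       ("moderate", b + cs.countP (fun x => decide (¬ x ≤ 5 ∧ x ≤ 10))),
       ("high", c + cs.countP (fun x => decide (¬ x ≤ 10 ∧ x ≤ 20))),
       ("very_high", d + cs.countP (fun x => decide (¬ x ≤ 20 ∧ x ≤ 50))),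
       ("extremely_high", e + cs.countP (fun x => decide (¬ x ≤ 50)))] := by
  induction cs generalizing a b c d e with
  | nil =>
    show (PySem.Dict.ofList [("simple", a), ("moderate", b), ("high", c), ("very_high", d), ("extremely_high", e)]).items = _
    simp [PySem.Dict.ofList, PySem.Dict.update, PySem.Dict.insert, PySem.Dict.empty, PySem.Dict.contains]
  | cons x xs ih =>
    simp only [List.foldl_cons, List.countP_cons]
    by_cases h5 : x ≤ 5
    · rw [if_pos h5]
      have : (PySem.Dict.ofList
          [("simple", a), ("moderate", b), ("high", c), ("very_high", d), ("extremely_high", e)]).modify "simple" 0 (· + 1)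
          = PySem.Dict.ofList
          [("simple", a + 1), ("moderate", b), ("high", c), ("very_high", d), ("extremely_high", e)] := by
        rfl
      rw [this, ih]
      simp [h5]
      omega
    · rw [if_neg h5]
      by_cases h10 : x ≤ 10
      · rw [if_pos h10]
        have : (PySem.Dict.ofList
            [("simple", a), ("moderate", b), ("high", c), ("very_high", d), ("extremely_high", e)]).modify "moderate" 0 (· + 1)
            = PySem.Dict.ofList
            [("simple", a), ("moderate", b + 1), ("high", c), ("very_high", d), ("extremely_high", e)] := by
          rfl
        rw [this, ih]
        simp [h5, h10]
        omega
      · rw [if_neg h10]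
        by_cases h20 : x ≤ 20
        · rw [if_pos h20]
          have : (PySem.Dict.ofList
              [("simple", a), ("moderate", b), ("high", c), ("very_high", d), ("extremely_high", e)]).modify "high" 0 (· + 1)
              = PySem.Dict.ofList
              [("simple", a), ("moderate", b), ("high", c + 1), ("very_high", d), ("extremely_high", e)] := by
            rfl
          rw [this, ih]
          simp [h5, h10, h20]
          omega
        · rw [if_neg h20]
          by_cases h50 : x ≤ 50
          · rw [if_pos h50]
            have : (PySem.Dict.ofList
                [("simple", a), ("moderate", b), ("high", c), ("very_high", d), ("extremely_high", e)]).modify "very_high" 0 (· + 1)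
                = PySem.Dict.ofList
                [("simple", a), ("moderate", b), ("high", c), ("very_high", d + 1), ("extremely_high", e)] := by
              rfl
            rw [this, ih]
            simp [h5, h10, h20, h50]
            omega
          · rw [if_neg h50]
            have : (PySem.Dict.ofList
                [("simple", a), ("moderate", b), ("high", c), ("very_high", d), ("extremely_high", e)]).modify "extremely_high" 0 (· + 1)
                = PySem.Dict.ofList
                [("simple", a), ("moderate", b), ("high", c), ("very_high", d), ("extremely_high", e + 1)] := by
              rfl
            rw [this, ih]
            simp [h5, h10, h20, h50]
            omega

-- each of B's cumulative-difference values equals the corresponding bucket count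
lemma countP_diff (cs : List Int) (s t : Int) (hst : s ≤ t) :
    (cs.countP (fun x => t.decLe x |> fun _ => decide (x ≤ t)) : Int)
      - cs.countP (fun x => decide (x ≤ s))
    = cs.countP (fun x => decide (¬ x ≤ s ∧ x ≤ t)) := by
  induction cs with
  | nil => simp
  | cons x xs ih =>
    by_cases hs : x ≤ s <;> by_cases ht : x ≤ t <;>
      simp [hs, ht, List.countP_cons] at ih ⊢ <;> omega

lemma len_diff (cs : List Int) (t : Int) :
    (cs.length : Int) - cs.countP (fun x => decide (x ≤ t))
    = cs.countP (fun x => decide (¬ x ≤ t)) := by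
  induction cs with
  | nil => simp
  | cons x xs ih =>
    by_cases ht : x ≤ t <;>
      simp [ht, List.countP_cons] at ih ⊢ <;> omega

-- ===== VERDICT =====
theorem categorize_complexities_py_spec : Claim_equal_categorize_complexities_py := by
  intro cs _
  unfold Spec_categorize_complexities_py categorize_complexities_py categorize_complexities_py_alt
  simp only []
  rw [fold_items]
  have h10 := countP_diff cs 5 10 (by norm_num)
  have h20 := countP_diff cs 10 20 (by norm_num)
  have h50 := countP_diff cs 20 50 (by norm_num)
  have hn := len_diff cs 50
  simp only [List.cons.injEq, Prod.mk.injEq, and_true, true_and] at *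
  simp at h10 h20 h50 hn ⊢
  refine ⟨by omega, by omega, by omega, by omega⟩
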